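-- pv_equiv track=rewrite | github.com/zhao-yiming/PI2C-project | game.py | computeMarbles
-- ===== SOURCE A (Python) =====
-- def computeMarbles(board,color):#compte le nombre des marbles sur le plateau (pour une couleur spécifique)
-- 	marbles=0
-- 	i=0
-- 	while i<9:
-- 		for state in range(len(board[i])):
-- 			if board[i][state]==color and OnBoard([i,state])==True:
-- 				marbles+=1
-- 		i+=1
-- 	return marbles
--
-- def OnBoard(pos):#vérifie si une position est sur le plateau du jeu
-- 	l,c=pos[0],pos[1]
-- 	if min(l,c)<0:
-- 		return False
-- 	if max(l,c)>8:
-- 		return False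
-- 	if abs(c-l)>=5:
-- 		return False
-- 	return True
-- ===== SOURCE B (Python) =====
-- def computeMarbles(board, color):
--     # Subtractive counting: count the color across the whole row with list.count,
--     # then subtract the matches lying in the off-board prefix/suffix slices.
--     marbles = 0
--     for i in range(9):
--         row = board[i]
--         marbles += row.count(color)
--         marbles -= row[:max(0, i - 4)].count(color)
--         marbles -= row[min(9, i + 5):].count(color)
--     return marbles
-- ===== Notes on version B (the rewrite author's own statement) =====
-- stated objective: alternative
-- what changed: B replaces A's per-cell scan with the OnBoard predicate by subtractive counting: for each row it takes the whole-row list.count(color) and subtracts the counts in the off-board prefix row[:max(0,i-4)] and suffix row[min(9,i+5):] slices, so no cell is ever tested individually.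
import Mathlib
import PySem

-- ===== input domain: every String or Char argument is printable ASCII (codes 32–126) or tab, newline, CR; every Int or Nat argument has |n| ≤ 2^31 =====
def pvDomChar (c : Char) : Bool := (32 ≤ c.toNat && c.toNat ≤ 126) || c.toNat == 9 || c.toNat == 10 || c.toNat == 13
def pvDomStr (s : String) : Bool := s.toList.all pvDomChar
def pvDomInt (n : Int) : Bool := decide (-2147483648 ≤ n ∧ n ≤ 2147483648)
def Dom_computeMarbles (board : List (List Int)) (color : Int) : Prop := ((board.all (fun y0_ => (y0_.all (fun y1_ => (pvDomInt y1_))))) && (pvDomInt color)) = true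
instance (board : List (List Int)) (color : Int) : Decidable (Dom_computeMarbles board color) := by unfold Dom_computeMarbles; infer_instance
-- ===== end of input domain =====

-- B counts the color per row with list.count and subtracts the counts of the off-board
-- prefix/suffix slices, instead of testing each cell with the OnBoard predicate
-- (alternative decomposition, same cost class).

-- ===== PORT A =====
-- helper OnBoard(pos)
def pvOnBoard (pos : List Int) : Bool :=
  let l := PySem.List.pyGetD pos 0 0
  let c := PySem.List.pyGetD pos 1 0
  if min l c < 0 then false
  else if max l c > 8 then false
  else if 5 ≤ (c - l).natAbs then false
  else true

def computeMarbles (board : List (List Int)) (color : Int) : Int :=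
  (PySem.List.pyRange 0 9).foldl (fun marbles i =>
    let row := PySem.List.pyGetD board i []
    (PySem.List.pyRange 0 (row.length : Int)).foldl (fun m state =>
      if (PySem.List.pyGetD row state 0 == color && pvOnBoard [i, state]) = true then m + 1 else m)
      marbles) 0

-- ===== PORT B =====
def computeMarbles_alt (board : List (List Int)) (color : Int) : Int :=
  (PySem.List.pyRange 0 9).foldl (fun marbles i =>
    let row := PySem.List.pyGetD board i []
    let marbles := marbles + (row.count color : Int)
    let marbles := marbles - ((PySem.List.slice row none (some (max 0 (i - 4)))).count color : Int)
    marbles - ((PySem.List.slice row (some (min 9 (i + 5))) none).count color : Int)) 0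

-- ===== PRECONDITION & SPEC =====
-- Pre_ excludes exactly the boards with fewer than 9 rows, on which the Python A (and B) raise IndexError.
def Pre_computeMarbles (board : List (List Int)) (color : Int) : Prop := 9 ≤ board.length
instance (board : List (List Int)) (color : Int) : Decidable (Pre_computeMarbles board color) := by unfold Pre_computeMarbles; infer_instance

def pvWitness_computeMarbles : List (List Int) × Int :=
  ([[1,2],[0],[1],[2],[0],[1],[2],[0],[1]], 1)

def Spec_computeMarbles (board : List (List Int)) (color : Int) (out : Int) : Prop := out = computeMarbles_alt board color
instance (board : List (List Int)) (color : Int) (out : Int) : Decidable (Spec_computeMarbles board color out) := by unfold Spec_computeMarbles; infer_instance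

-- ===== CLAIM (what is proved, stated in full; the proofs are below) =====
def Claim_equal_computeMarbles : Prop := ∀ (board : List (List Int)) (color : Int), Dom_computeMarbles board color → Pre_computeMarbles board color → Spec_computeMarbles board color (computeMarbles board color)

-- ===== LEMMAS AND PROOFS =====

-- On a position [i, c] with 0 ≤ i < 9 and 0 ≤ c, OnBoard is exactly the band condition.
lemma pvOnBoard_band (i c : Int) (h0 : 0 ≤ i) (h9 : i < 9) (hc : 0 ≤ c) :
    pvOnBoard [i, c] = (decide (max 0 (i - 4) ≤ c) && decide (c < min 9 (i + 5))) := by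
  simp only [pvOnBoard, PySem.List.pyGetD]
  norm_num
  rw [Bool.eq_iff_iff]
  simp only [Bool.and_eq_true, Bool.not_eq_true', decide_eq_false_iff_not, decide_eq_true_eq]
  omega

-- a map of pyGetD over an in-range index interval is the corresponding sublist
lemma map_pyGetD_segment (row : List Int) (a b : Nat) (hab : a ≤ b) (hbn : b ≤ row.length) :
    (PySem.List.pyRange (a : Int) (b : Int)).map (fun j => PySem.List.pyGetD row j 0)
      = (row.drop a).take (b - a) := by
  have h1 : (PySem.List.pyRange (a : Int) (row.length : Int)).map (fun j => PySem.List.pyGetD row j 0)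
      = row.drop a := by
    have := PySem.List.map_pyGetD_pyRange' (xs := row) (a := (a : Int)) (d := 0) (by positivity)
    simpa using this
  have hsp : PySem.List.pyRange (a : Int) (row.length : Int)
      = PySem.List.pyRange (a : Int) (b : Int) ++ PySem.List.pyRange (b : Int) (row.length : Int) :=
    PySem.List.pyRange_one_append _ _ _ (by exact_mod_cast hab) (by exact_mod_cast hbn)
  rw [hsp, List.map_append] at h1
  have h2 : (PySem.List.pyRange (b : Int) (row.length : Int)).map (fun j => PySem.List.pyGetD row j 0)
      = row.drop b := by
    have := PySem.List.map_pyGetD_pyRange' (xs := row) (a := (b : Int)) (d := 0) (by positivity)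
    simpa using this
  have h3 : row.drop a = (row.drop a).take (b - a) ++ row.drop b := by
    conv_lhs => rw [← List.take_append_drop (b - a) (row.drop a)]
    rw [List.drop_drop]
    congr 2
    omega
  rw [h2, h3] at h1
  exact List.append_cancel_right h1

-- per-row equality: A's filtered scan equals B's subtractive count
lemma row_eq (row : List Int) (color i : Int) (h0 : 0 ≤ i) (h9 : i < 9) (m : Int) :
    (PySem.List.pyRange 0 (row.length : Int)).foldl (fun acc c =>
        if (PySem.List.pyGetD row c 0 == color && pvOnBoard [i, c]) = true then acc + 1 else acc) m
    = m + (row.count color : Int)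
        - ((PySem.List.slice row none (some (max 0 (i - 4)))).count color : Int)
        - ((PySem.List.slice row (some (min 9 (i + 5))) none).count color : Int) := by
  obtain ⟨lo, hlo⟩ : ∃ lo : Nat, max 0 (i - 4) = (lo : Int) := ⟨(i - 4).toNat, by omega⟩
  obtain ⟨mi, hmi⟩ : ∃ mi : Nat, min 9 (i + 5) = (mi : Int) := ⟨(min 9 (i + 5)).toNat, by omega⟩
  have hlomi : lo < mi := by omega
  rw [hlo, hmi, PySem.List.slice_to_natCast, PySem.List.slice_from_natCast,
    PySem.List.foldl_count_if]
  set n : Nat := row.length with hn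
  set a : Nat := min lo n with ha
  set b : Nat := min mi n with hb
  -- rewrite the predicate into the band form on the scanned range
  have hcong : (PySem.List.pyRange 0 (n : Int)).countP
        (fun c => PySem.List.pyGetD row c 0 == color && pvOnBoard [i, c])
      = (PySem.List.pyRange 0 (n : Int)).countP
        (fun c => PySem.List.pyGetD row c 0 == color
          && (decide ((a : Int) ≤ c) && decide (c < (b : Int)))) := by
    apply List.countP_congr
    intro c hc
    rw [PySem.List.mem_pyRange_one] at hc
    rw [pvOnBoard_band i c h0 h9 hc.1, hlo, hmi]
    have : (decide ((lo : Int) ≤ c) && decide (c < (mi : Int)))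
        = (decide ((a : Int) ≤ c) && decide (c < (b : Int))) := by
      rw [Bool.eq_iff_iff]
      simp only [Bool.and_eq_true, decide_eq_true_eq]
      omega
    rw [this]
  rw [hcong]
  -- split the range at a and b
  have hsplit : PySem.List.pyRange 0 (n : Int)
      = PySem.List.pyRange 0 (a : Int)
        ++ (PySem.List.pyRange (a : Int) (b : Int) ++ PySem.List.pyRange (b : Int) (n : Int)) := by
    rw [← PySem.List.pyRange_one_append (a : Int) (b : Int) (n : Int)
        (by exact_mod_cast (show a ≤ b by omega)) (by exact_mod_cast (show b ≤ n by omega))]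
    exact PySem.List.pyRange_one_append 0 (a : Int) (n : Int) (by positivity)
      (by exact_mod_cast (show a ≤ n by omega))
  rw [hsplit, List.countP_append, List.countP_append]
  have hleft : (PySem.List.pyRange 0 (a : Int)).countP
      (fun c => PySem.List.pyGetD row c 0 == color
        && (decide ((a : Int) ≤ c) && decide (c < (b : Int)))) = 0 := by
    rw [List.countP_eq_zero]
    intro c hc
    rw [PySem.List.mem_pyRange_one] at hc
    simp only [Bool.and_eq_true, decide_eq_true_eq, not_and]
    intro _ h
    omega
  have hright : (PySem.List.pyRange (b : Int) (n : Int)).countP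
      (fun c => PySem.List.pyGetD row c 0 == color
        && (decide ((a : Int) ≤ c) && decide (c < (b : Int)))) = 0 := by
    rw [List.countP_eq_zero]
    intro c hc
    rw [PySem.List.mem_pyRange_one] at hc
    simp only [Bool.and_eq_true, decide_eq_true_eq, not_and]
    intro _ _ h
    omega
  have hmid : (PySem.List.pyRange (a : Int) (b : Int)).countP
      (fun c => PySem.List.pyGetD row c 0 == color
        && (decide ((a : Int) ≤ c) && decide (c < (b : Int))))
      = ((row.drop a).take (b - a)).count color := by
    have hm : (PySem.List.pyRange (a : Int) (b : Int)).countP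
        (fun c => PySem.List.pyGetD row c 0 == color)
        = ((row.drop a).take (b - a)).count color := by
      rw [← map_pyGetD_segment row a b (by omega) (Nat.min_le_right mi n), List.count,
        List.countP_map]
      rfl
    rw [← hm]
    apply List.countP_congr
    intro c hc
    rw [PySem.List.mem_pyRange_one] at hc
    have h1 : decide ((a : Int) ≤ c) = true := by simp; omega
    have h2 : decide (c < (b : Int)) = true := by simp; omega
    rw [h1, h2]
    simp
  rw [hleft, hright, hmid]
  -- the Nat decomposition of the whole-row count
  have htake : row.take lo = row.take a := by
    by_cases h : lo ≤ n
    · have : a = lo := by omega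
      rw [this]
    · push_neg at h
      have h1 : row.take lo = row := List.take_of_length_le (by omega)
      have h2 : a = n := by omega
      rw [h1, h2, hn, List.take_length]
  have hdrop : row.drop mi = row.drop b := by
    by_cases h : mi ≤ n
    · have : b = mi := by omega
      rw [this]
    · push_neg at h
      have h1 : row.drop mi = [] := List.drop_eq_nil_of_le (by omega)
      have h2 : b = n := by omega
      rw [h1, h2, hn, List.drop_length]
  have hcount : row.count color
      = (row.take a).count color + ((row.drop a).take (b - a)).count color
        + (row.drop b).count color := by
    have h3 : row.drop a = (row.drop a).take (b - a) ++ row.drop b := by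
      conv_lhs => rw [← List.take_append_drop (b - a) (row.drop a)]
      rw [List.drop_drop]
      congr 2
      omega
    conv_lhs => rw [← List.take_append_drop a row, h3]
    rw [List.count_append, List.count_append]
    ring
  rw [htake, hdrop]
  simp only [hcount]
  push_cast
  ring

-- ===== VERDICT (by name: the statement is the Claim_ definition above) =====
theorem computeMarbles_spec : Claim_equal_computeMarbles := by
  intro board color _ _
  unfold Spec_computeMarbles computeMarbles computeMarbles_alt
  apply PySem.List.foldl_congr_mem
  intro acc i hi
  rw [PySem.List.mem_pyRange_one] at hi
  simp only []
  exact row_eq _ color i hi.1 hi.2 acc
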